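-- pv_equiv track=rewrite | github.com/Fellepp/ITGK | Øving 5/Arbeidsdager.py | teller
-- ===== SOURCE A (Python) =====
-- def is_leap_year ( year ):
--     if year % 400 == 0:
--         return True
--     elif year % 100 == 0:
--         return False
--     elif year % 4 == 0:
--         return True
--     return False
--
-- def teller(year1, year2):
--     verdi = 0
--     for i in range(year1, year2):
--         if(is_leap_year(i)):
--             verdi += 2
--         else:
--             verdi += 1
--         if verdi>6:
--             verdi %= 7
--     return verdi
-- ===== SOURCE B (Python) =====
-- def teller(year1, year2):
--     if year2 <= year1:
--         return 0
--     def f(n):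
--         return n // 4 - n // 100 + n // 400
--     return ((year2 - year1) + f(year2 - 1) - f(year1 - 1)) % 7
-- ===== Notes on version B (the rewrite author's own statement) =====
-- stated objective: faster
-- what changed: replaces the per-year loop with the closed-form leap-year count n//4 - n//100 + n//400 taken as a difference at the range ends, reduced once mod 7
import Mathlib
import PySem

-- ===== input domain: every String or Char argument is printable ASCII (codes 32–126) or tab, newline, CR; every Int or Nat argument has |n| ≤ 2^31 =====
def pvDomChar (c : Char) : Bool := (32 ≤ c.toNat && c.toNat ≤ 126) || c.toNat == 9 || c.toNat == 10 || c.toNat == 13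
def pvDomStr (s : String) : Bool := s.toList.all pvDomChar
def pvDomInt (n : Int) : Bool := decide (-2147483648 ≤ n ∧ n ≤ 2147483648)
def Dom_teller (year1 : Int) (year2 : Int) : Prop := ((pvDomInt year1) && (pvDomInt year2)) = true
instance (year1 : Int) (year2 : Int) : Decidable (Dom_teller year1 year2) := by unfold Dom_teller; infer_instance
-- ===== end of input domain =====

-- B replaces A's per-year loop by the closed-form leap-year count n//4 - n//100 + n//400
-- taken as a difference at the range ends, reduced once mod 7 (objective: faster, O(1) vs O(year2-year1)).

-- ===== PORT A =====
def isLeapYear (year : Int) : Bool :=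
  if PySem.Int.mod year 400 = 0 then true
  else if PySem.Int.mod year 100 = 0 then false
  else if PySem.Int.mod year 4 = 0 then true
  else false

def teller (year1 : Int) (year2 : Int) : Int :=
  (PySem.List.pyRange year1 year2 1).foldl
    (fun verdi i =>
      let verdi := verdi + (if isLeapYear i then 2 else 1)
      if verdi > 6 then PySem.Int.mod verdi 7 else verdi) 0

-- ===== PORT B =====
def leapCount (n : Int) : Int :=
  PySem.Int.floordiv n 4 - PySem.Int.floordiv n 100 + PySem.Int.floordiv n 400

def teller_alt (year1 : Int) (year2 : Int) : Int :=
  if year2 ≤ year1 then 0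
  else PySem.Int.mod (year2 - year1 + leapCount (year2 - 1) - leapCount (year1 - 1)) 7

-- ===== PRECONDITION & SPEC =====
def Spec_teller (year1 : Int) (year2 : Int) (out : Int) : Prop := out = teller_alt year1 year2
instance (year1 : Int) (year2 : Int) (out : Int) : Decidable (Spec_teller year1 year2 out) := by unfold Spec_teller; infer_instance

-- ===== CLAIM (what is proved, stated in full; the proofs are below) =====
def Claim_equal_teller : Prop := ∀ (year1 : Int) (year2 : Int), Dom_teller year1 year2 → Spec_teller year1 year2 (teller year1 year2)

-- ===== LEMMAS AND PROOFS =====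

-- one step of the closed-form count: leapCount b - leapCount (b-1) is 1 exactly on leap years
lemma leapCount_step (b : Int) :
    leapCount b = leapCount (b - 1) + (if isLeapYear b then 1 else 0) := by
  unfold leapCount isLeapYear
  simp only [PySem.Int.mod_eq_emod_of_pos (show (0:Int) < 400 by norm_num),
    PySem.Int.mod_eq_emod_of_pos (show (0:Int) < 100 by norm_num),
    PySem.Int.mod_eq_emod_of_pos (show (0:Int) < 4 by norm_num),
    PySem.Int.floordiv_eq_ediv_of_pos (show (0:Int) < 400 by norm_num),
    PySem.Int.floordiv_eq_ediv_of_pos (show (0:Int) < 100 by norm_num),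
    PySem.Int.floordiv_eq_ediv_of_pos (show (0:Int) < 4 by norm_num)]
  have h4 : b / 4 = (b - 1) / 4 + (if b % 4 = 0 then 1 else 0) := by split_ifs <;> omega
  have h100 : b / 100 = (b - 1) / 100 + (if b % 100 = 0 then 1 else 0) := by split_ifs <;> omega
  have h400 : b / 400 = (b - 1) / 400 + (if b % 400 = 0 then 1 else 0) := by split_ifs <;> omega
  have m1 : b % 400 = 0 → b % 100 = 0 := by omega
  have m2 : b % 100 = 0 → b % 4 = 0 := by omega
  split_ifs at h4 h100 h400 ⊢ <;> first | omega | simp_all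

lemma teller_mod (n : Nat) : ∀ (y1 y2 : Int), (y2 - y1).toNat = n → y1 < y2 →
    teller y1 y2 = PySem.Int.mod (y2 - y1 + leapCount (y2 - 1) - leapCount (y1 - 1)) 7 := by
  induction n with
  | zero => intro y1 y2 h hlt; omega
  | succ n ih =>
    intro y1 y2 h hlt
    have hsucc : y2 - 1 + 1 = y2 := by omega
    have hle : y1 ≤ y2 - 1 := by omega
    have hsplit : PySem.List.pyRange y1 y2 1 =
        PySem.List.pyRange y1 (y2 - 1) 1 ++ [y2 - 1] := by
      have h0 := PySem.List.pyRange_one_succ_right hle (a := y1) (b := y2 - 1)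
      rwa [hsucc] at h0
    unfold teller
    rw [hsplit, List.foldl_append]
    by_cases hlt' : y1 < y2 - 1
    · have hv := ih y1 (y2 - 1) (by omega) hlt'
      unfold teller at hv
      rw [hv]
      have hstep := leapCount_step (y2 - 1)
      rw [PySem.Int.mod_eq_emod_of_pos (by norm_num : (0:Int) < 7),
          PySem.Int.mod_eq_emod_of_pos (by norm_num : (0:Int) < 7)]
      simp only [List.foldl]
      by_cases hl : isLeapYear (y2 - 1) = true
      · simp only [hl, if_true] at hstep ⊢
        split_ifs with hgt
        · rw [PySem.Int.mod_eq_emod_of_pos (by norm_num : (0:Int) < 7)]; omega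
        · omega
      · simp only [hl, if_false, Bool.false_eq_true] at hstep ⊢
        split_ifs with hgt
        · rw [PySem.Int.mod_eq_emod_of_pos (by norm_num : (0:Int) < 7)]; omega
        · omega
    · have hy : y2 - 1 = y1 := by omega
      rw [hy, PySem.List.pyRange_one_eq_nil (le_refl y1)]
      have hstep := leapCount_step y1
      rw [PySem.Int.mod_eq_emod_of_pos (by norm_num : (0:Int) < 7)]
      simp only [List.foldl]
      by_cases hl : isLeapYear y1 = true
      · simp only [hl, if_true] at hstep ⊢
        split_ifs with hgt
        · omega
        · omega
      · simp only [hl, if_false, Bool.false_eq_true] at hstep ⊢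
        split_ifs with hgt
        · omega
        · omega

-- ===== VERDICT (by name: the statement is the Claim_ definition above) =====
theorem teller_spec : Claim_equal_teller := by
  intro y1 y2 _
  unfold Spec_teller teller_alt
  by_cases hle : y2 ≤ y1
  · simp only [hle, if_true]
    unfold teller
    rw [PySem.List.pyRange_one_eq_nil hle]
    rfl
  · simp only [hle, if_false]
    exact teller_mod (y2 - y1).toNat y1 y2 rfl (by omega)
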